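-- pv_equiv track=rewrite | github.com/jhosstich/PDF_ConImages | decompress.py | asciiHexDecode
-- ===== SOURCE A (Python) =====
-- def asciiHexDecode(data):
--     '''
--         Method to decode streams using hexadecimal encoding
--
--         @param stream: A PDF stream
--         @return: A tuple (status,statusContent), where statusContent is the decoded PDF stream in case status = 0 or an error in case status = -1
--     '''
--     try:
--         eod = '>'
--         decodedStream = ''
--         char = ''
--         index = 0
--         while index < len(data):
--             c = data[index]
--             if c == eod:
--                 if len(decodedStream) % 2 != 0:
--                     char += '0'
--                     try:
--                         decodedStream += chr(int(char, base=16))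
--                     except:
--                         return (-1, 'Error in hexadecimal conversion')
--                 break
--             elif c.isspace():
--                 index += 1
--                 continue
--             char += c
--             if len(char) == 2:
--                 try:
--                     decodedStream += chr(int(char, base=16))
--                 except:
--                     return (-1, 'Error in hexadecimal conversion')
--                 char = ''
--             index += 1
--         return (0, decodedStream)
--     except Exception as e:
--        raise e
-- ===== SOURCE B (Python) =====
-- def asciiHexDecode(data):
--     # Collect the hex characters up to the end-of-data marker '>', pad a pending
--     # trailing nibble with '0' at the marker, then decode pair by pair.
--     hexchars = []
--     found = False
--     for c in data:
--         if c == '>':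
--             found = True
--             break
--         if not c.isspace():
--             hexchars.append(c)
--     if found and len(hexchars) % 2 == 1:
--         hexchars.append('0')
--     out = []
--     for i in range(0, len(hexchars) - 1, 2):
--         try:
--             out.append(chr(int(hexchars[i] + hexchars[i + 1], 16)))
--         except Exception:
--             return (-1, 'Error in hexadecimal conversion')
--     return (0, ''.join(out))
-- ===== Notes on version B (the rewrite author's own statement) =====
-- stated objective: simpler
-- what changed: A's single-pass state machine (pending-nibble buffer, inline pad check at the end-of-data marker, output built by repeated string concatenation) is replaced by three separate passes: collect the non-whitespace characters up to the first end-of-data marker, pad a pending trailing nibble at the marker, then decode pair by pair into a list joined once.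
-- intended difference: On inputs whose end-of-data marker is preceded by N non-space characters with N mod 4 in {1,2} and every complete pair convertible, A pads based on the parity of the decoded output length rather than on the pending nibble: for N mod 4 = 2 it appends a spurious NUL character and for N mod 4 = 1 it silently drops the pending nibble, while B pads the pending nibble exactly when one is pending, which is what the ASCIIHexDecode filter intends. — e.g. on asciiHexDecode("1>"): A returns (0, ""), B returns (0, "\x10")
import Mathlib
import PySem

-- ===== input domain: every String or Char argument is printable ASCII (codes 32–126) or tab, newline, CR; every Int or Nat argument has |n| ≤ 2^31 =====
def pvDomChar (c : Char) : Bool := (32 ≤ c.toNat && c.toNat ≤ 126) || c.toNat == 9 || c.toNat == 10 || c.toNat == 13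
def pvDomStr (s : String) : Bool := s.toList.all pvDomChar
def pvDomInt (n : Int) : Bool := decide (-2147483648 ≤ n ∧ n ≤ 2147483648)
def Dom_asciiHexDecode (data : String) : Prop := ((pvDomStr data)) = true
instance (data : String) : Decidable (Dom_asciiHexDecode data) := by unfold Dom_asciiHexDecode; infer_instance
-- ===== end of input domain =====

-- B replaces A's one-pass state machine by collect-pad-decode passes (objective: simpler);
-- on the D_ inputs below A's parity-of-output pad rule is wrong and B returns the intended value.

-- ===== PORT A =====
-- shared primitive: Python's int(s, 16) for the short strings both programs feed it
-- (optional sign, then a nonempty run of hex digits; none = ValueError) — exact there.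
def pvHexDigit? (c : Char) : Option Nat :=
  if '0' ≤ c ∧ c ≤ '9' then some (c.toNat - '0'.toNat)
  else if 'a' ≤ c ∧ c ≤ 'f' then some (c.toNat - 'a'.toNat + 10)
  else if 'A' ≤ c ∧ c ≤ 'F' then some (c.toNat - 'A'.toNat + 10)
  else none

def pvHexDigits? : List Char → Option Nat
  | [] => some 0
  | c :: rest =>
    match pvHexDigit? c, pvHexDigits? rest with
    | some d, some n => some (d * 16 ^ rest.length + n)
    | _, _ => none

def pvHexInt? (s : List Char) : Option Int :=
  match s with
  | [] => none
  | c :: t =>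
    if c = '+' then (if t = [] then none else (pvHexDigits? t).map (fun n => (n : Int)))
    else if c = '-' then (if t = [] then none else (pvHexDigits? t).map (fun n => -(n : Int)))
    else (pvHexDigits? (c :: t)).map (fun n => (n : Int))

-- shared primitive: Python's chr(n) (none = ValueError for n out of range) — exact.
def pvChr? (n : Int) : Option Char :=
  if 0 ≤ n ∧ n < 1114112 then some (Char.ofNat n.toNat) else none

-- int(char, 16) followed by chr(...), the guarded step both programs perform
def pvPair? (s : List Char) : Option Char := (pvHexInt? s).bind pvChr?

-- A's while loop: state = (remaining input, decodedStream, char)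
def pvAGo : List Char → List Char → List Char → Int × String
  | [], dec, _ => (0, String.ofList dec)
  | c :: rest, dec, char =>
    if c = '>' then
      if dec.length % 2 ≠ 0 then
        match pvPair? (char ++ ['0']) with
        | none => (-1, "Error in hexadecimal conversion")
        | some ch => (0, String.ofList (dec ++ [ch]))
      else (0, String.ofList dec)
    else if PySem.Chars.isspace c then pvAGo rest dec char
    else
      let char' := char ++ [c]
      if char'.length = 2 then
        match pvPair? char' with
        | none => (-1, "Error in hexadecimal conversion")
        | some ch => pvAGo rest (dec ++ [ch]) []
      else pvAGo rest dec char'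

def asciiHexDecode (data : String) : Int × String := pvAGo data.toList [] []

-- ===== PORT B =====
-- pass 1: collect non-whitespace chars up to the first '>', flag whether '>' was found
def pvCollect : List Char → List Char × Bool
  | [] => ([], false)
  | c :: rest =>
    if c = '>' then ([], true)
    else
      let (hs, f) := pvCollect rest
      if PySem.Chars.isspace c then (hs, f) else (c :: hs, f)

-- pass 3: decode pair by pair, front to back (a trailing unpaired char is skipped,
-- as by range(0, len - 1, 2)); none = the first failing conversion
def pvDecodePairs : List Char → Option (List Char)
  | a :: b :: rest =>
    match pvPair? [a, b], pvDecodePairs rest with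
    | some ch, some t => some (ch :: t)
    | some _, none => none
    | none, _ => none
  | _ => some []

def asciiHexDecode_alt (data : String) : Int × String :=
  let (hexchars, found) := pvCollect data.toList
  -- pass 2: pad a pending trailing nibble with '0' at the end-of-data marker
  let hexchars2 := if found = true ∧ hexchars.length % 2 = 1 then hexchars ++ ['0'] else hexchars
  match pvDecodePairs hexchars2 with
  | none => (-1, "Error in hexadecimal conversion")
  | some out => (0, String.ofList out)

-- ===== PRECONDITION & SPEC =====
-- helpers for D_ (closed-form reading of the input; no port code):
def pvIsHexDig (c : Char) : Bool :=
  ('0' ≤ c && c ≤ '9') || ('a' ≤ c && c ≤ 'f') || ('A' ≤ c && c ≤ 'F')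

-- every complete two-char group converts: digit-digit, '+'-digit, or '-'-'0'
def pvGoodPairs : List Char → Bool
  | [] => true
  | [_] => true
  | a :: b :: rest =>
    (((pvIsHexDig a || a == '+') && pvIsHexDig b) || (a == '-' && b == '0')) && pvGoodPairs rest

-- the non-whitespace characters before the first '>'
def pvHexRun (l : List Char) : List Char :=
  (l.takeWhile (fun c => c ≠ '>')).filter (fun c => !(PySem.Chars.isspace c))

-- On inputs whose end-of-data marker is preceded by N non-space characters with N mod 4 ∈ {1, 2}
-- and every complete pair convertible, A pads by the parity of the DECODED OUTPUT length instead
-- of the pending nibble: for N mod 4 = 2 it appends a spurious NUL character, for N mod 4 = 1 it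
-- silently drops the pending nibble; B pads the pending nibble exactly when one is pending, which
-- is what the ASCIIHexDecode filter intends.
def D_asciiHexDecode (data : String) : Prop :=
  ('>' ∈ data.toList) ∧
  ((pvHexRun data.toList).length % 4 = 1 ∨ (pvHexRun data.toList).length % 4 = 2) ∧
  pvGoodPairs (pvHexRun data.toList) = true
instance (data : String) : Decidable (D_asciiHexDecode data) := by unfold D_asciiHexDecode; infer_instance

def Spec_asciiHexDecode (data : String) (out : Int × String) : Prop :=
  ¬ D_asciiHexDecode data → out = asciiHexDecode_alt data
instance (data : String) (out : Int × String) : Decidable (Spec_asciiHexDecode data out) := by unfold Spec_asciiHexDecode; infer_instance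

def pvDiffWitness_asciiHexDecode : String := "1>"
def pvDiffWitnessOut_asciiHexDecode : (Int × String) × (Int × String) := ((0, ""), (0, "\x10"))

-- ===== CLAIM (what is proved, stated in full; the proofs are below) =====
def Claim_unchanged_asciiHexDecode : Prop := ∀ (data : String), Dom_asciiHexDecode data → Spec_asciiHexDecode data (asciiHexDecode data)
def Claim_changed_asciiHexDecode : Prop := Dom_asciiHexDecode (pvDiffWitness_asciiHexDecode) ∧ D_asciiHexDecode (pvDiffWitness_asciiHexDecode) ∧ asciiHexDecode (pvDiffWitness_asciiHexDecode) = pvDiffWitnessOut_asciiHexDecode.1 ∧ asciiHexDecode_alt (pvDiffWitness_asciiHexDecode) = pvDiffWitnessOut_asciiHexDecode.2 ∧ pvDiffWitnessOut_asciiHexDecode.1 ≠ pvDiffWitnessOut_asciiHexDecode.2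

-- ===== LEMMAS AND PROOFS =====

-- A's loop expressed as a two-pass pipeline over the not-yet-consumed input
def pvRun (dec char cs : List Char) : Int × String :=
  let (hs, f) := pvCollect cs
  let all := char ++ hs
  match pvDecodePairs all with
  | none => (-1, "Error in hexadecimal conversion")
  | some out =>
    if f ∧ (dec.length + all.length / 2) % 2 = 1 then
      let leftover := if all.length % 2 = 1 then [all.getLast!] else []
      match pvPair? (leftover ++ ['0']) with
      | none => (-1, "Error in hexadecimal conversion")
      | some ch => (0, String.ofList (dec ++ out ++ [ch]))
    else (0, String.ofList (dec ++ out))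

theorem pvGetLast_cons_cons (a b : Char) (l : List Char) (h : l ≠ []) :
    (a :: b :: l).getLast! = l.getLast! := by
  cases l with
  | nil => exact absurd rfl h
  | cons x xs => simp [List.getLast!, List.getLast_cons]

theorem pvAGo_eq_pvRun (cs : List Char) :
    ∀ dec char, char.length ≤ 1 → pvAGo cs dec char = pvRun dec char cs := by
  induction cs with
  | nil =>
    intro dec char hc
    rcases char with _ | ⟨a, _ | ⟨b, t⟩⟩
    · simp [pvAGo, pvRun, pvCollect, pvDecodePairs]
    · simp [pvAGo, pvRun, pvCollect, pvDecodePairs]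
    · simp at hc
  | cons c rest ih =>
    intro dec char hc
    by_cases hgt : c = '>'
    · subst hgt
      rcases char with _ | ⟨a, _ | ⟨b, t⟩⟩
      · by_cases hd : dec.length % 2 = 1
        · simp [pvAGo, pvRun, pvCollect, pvDecodePairs, hd]
        · simp [pvAGo, pvRun, pvCollect, pvDecodePairs, hd] at hd ⊢
      · by_cases hd : dec.length % 2 = 1
        · simp [pvAGo, pvRun, pvCollect, pvDecodePairs, hd, List.getLast!]
        · simp [pvAGo, pvRun, pvCollect, pvDecodePairs, hd] at hd ⊢
      · simp at hc
    · by_cases hsp : PySem.Chars.isspace c = true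
      · have hrun : pvRun dec char (c :: rest) = pvRun dec char rest := by
          simp [pvRun, pvCollect, hgt, hsp]
        rw [hrun]
        simp only [pvAGo, if_neg hgt, hsp, if_true]
        exact ih dec char hc
      · rcases char with _ | ⟨a, _ | ⟨b, t⟩⟩
        · -- pending nibble empty: the new char becomes the pending nibble
          have h1 : pvAGo (c :: rest) dec [] = pvAGo rest dec [c] := by
            simp [pvAGo, hgt, hsp]
          have h2 : pvRun dec [] (c :: rest) = pvRun dec [c] rest := by
            simp only [pvRun, pvCollect, if_neg hgt, hsp]
            rcases pvCollect rest with ⟨hs, f⟩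
            simp
          rw [h1, h2]
          exact ih dec [c] (by simp)
        · -- pending nibble a: the pair [a, c] completes
          have h1 : pvAGo (c :: rest) dec [a] =
              match pvPair? [a, c] with
              | none => (-1, "Error in hexadecimal conversion")
              | some ch => pvAGo rest (dec ++ [ch]) [] := by
            simp [pvAGo, hgt, hsp]
          rw [h1]
          rcases hcol : pvCollect rest with ⟨hs, f⟩
          have h2 : pvRun dec [a] (c :: rest) =
              match pvPair? [a, c], pvDecodePairs hs with
              | none, _ => (-1, "Error in hexadecimal conversion")
              | some _, none => (-1, "Error in hexadecimal conversion")
              | some ch, some t =>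
                if f ∧ (dec.length + (a :: c :: hs).length / 2) % 2 = 1 then
                  match pvPair? ((if (a :: c :: hs).length % 2 = 1 then [(a :: c :: hs).getLast!] else []) ++ ['0']) with
                  | none => (-1, "Error in hexadecimal conversion")
                  | some p => (0, String.ofList (dec ++ (ch :: t) ++ [p]))
                else (0, String.ofList (dec ++ (ch :: t))) := by
            simp only [pvRun, pvCollect, if_neg hgt, hsp, Bool.false_eq_true, if_false, hcol]
            rcases hp : pvPair? [a, c] with _ | ch
            · simp [pvDecodePairs, hp]
            · rcases hdp : pvDecodePairs hs with _ | t
              · simp [pvDecodePairs, hp, hdp]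
              · simp [pvDecodePairs, hp, hdp]
          rw [h2]
          rcases hp : pvPair? [a, c] with _ | ch
          · rfl
          · rcases hdp : pvDecodePairs hs with _ | t
            · show pvAGo rest (dec ++ [ch]) [] = _
              rw [ih (dec ++ [ch]) [] (by simp)]
              simp [pvRun, hcol, List.nil_append, hdp]
            · show pvAGo rest (dec ++ [ch]) [] = _
              rw [ih (dec ++ [ch]) [] (by simp)]
              simp only [pvRun, hcol, List.nil_append, hdp]
              have hcnd : (f ∧ ((dec ++ [ch]).length + hs.length / 2) % 2 = 1) ↔
                  (f ∧ (dec.length + (a :: c :: hs).length / 2) % 2 = 1) := by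
                simp only [List.length_append, List.length_cons, List.length_nil]
                constructor <;> rintro ⟨hf, hx⟩ <;> exact ⟨hf, by omega⟩
              rw [if_congr hcnd rfl rfl]
              by_cases hcond : f ∧ (dec.length + (a :: c :: hs).length / 2) % 2 = 1
              · simp only [if_pos hcond]
                have hlen : (a :: c :: hs).length % 2 = hs.length % 2 := by
                  simp only [List.length_cons]; omega
                rw [hlen]
                by_cases hodd : hs.length % 2 = 1
                · have hne : hs ≠ [] := by
                    intro h0; rw [h0] at hodd; simp at hodd
                  rw [if_pos hodd, if_pos hodd, pvGetLast_cons_cons a c hs hne]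
                  rcases pvPair? ([hs.getLast!] ++ ['0']) with _ | p
                  · rfl
                  · simp
                · rw [if_neg hodd, if_neg hodd]
                  rcases pvPair? ([] ++ ['0']) with _ | p
                  · rfl
                  · simp
              · simp only [if_neg hcond]
                simp
        · simp at hc

-- Char order/equality in terms of character codes
theorem pvChar_le_toNat {a b : Char} : a ≤ b ↔ a.toNat ≤ b.toNat :=
  ⟨fun h => Fin.mk_le_mk.mp h, fun h => Fin.mk_le_mk.mpr h⟩

theorem pvHexDigit?_isSome (c : Char) : (pvHexDigit? c).isSome = pvIsHexDig c := by
  unfold pvHexDigit? pvIsHexDig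
  split_ifs with h1 h2 h3 <;> simp_all

theorem pvHexDigit?_lt (c : Char) (d : Nat) (h : pvHexDigit? c = some d) : d < 16 := by
  unfold pvHexDigit? at h
  split_ifs at h with h1 h2 h3
  · obtain ⟨ha, hb⟩ := h1
    replace ha := pvChar_le_toNat.mp ha
    replace hb := pvChar_le_toNat.mp hb
    injection h with h
    rw [show ('0':Char).toNat = 48 from rfl] at ha h
    rw [show ('9':Char).toNat = 57 from rfl] at hb
    omega
  · obtain ⟨ha, hb⟩ := h2
    replace ha := pvChar_le_toNat.mp ha
    replace hb := pvChar_le_toNat.mp hb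
    injection h with h
    rw [show ('a':Char).toNat = 97 from rfl] at ha h
    rw [show ('f':Char).toNat = 102 from rfl] at hb
    omega
  · obtain ⟨ha, hb⟩ := h3
    replace ha := pvChar_le_toNat.mp ha
    replace hb := pvChar_le_toNat.mp hb
    injection h with h
    rw [show ('A':Char).toNat = 65 from rfl] at ha h
    rw [show ('F':Char).toNat = 70 from rfl] at hb
    omega

theorem pvHexDigit?_eq_zero (c : Char) : pvHexDigit? c = some 0 ↔ c = '0' := by
  constructor
  · intro h
    unfold pvHexDigit? at h
    split_ifs at h with h1 h2 h3
    · obtain ⟨ha, hb⟩ := h1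
      replace ha := pvChar_le_toNat.mp ha
      replace hb := pvChar_le_toNat.mp hb
      injection h with h
      rw [show ('0':Char).toNat = 48 from rfl] at ha h
      have h48 : c.toNat = 48 := by omega
      have h2 := Char.ofNat_toNat c
      rw [h48] at h2
      exact h2.symm
    · obtain ⟨ha, hb⟩ := h2
      replace ha := pvChar_le_toNat.mp ha
      injection h with h
      rw [show ('a':Char).toNat = 97 from rfl] at ha h
      omega
    · obtain ⟨ha, hb⟩ := h3
      replace ha := pvChar_le_toNat.mp ha
      injection h with h
      rw [show ('A':Char).toNat = 65 from rfl] at ha h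
      omega
  · intro h; subst h; decide

theorem pvHexDigits?_single (b : Char) : pvHexDigits? [b] = pvHexDigit? b := by
  cases hb : pvHexDigit? b <;> simp [pvHexDigits?, hb]

theorem pvChr?_of_lt (d : Nat) (h : d < 1114112) : pvChr? (d : Int) = some (Char.ofNat d) := by
  rw [pvChr?, if_pos (⟨by omega, by omega⟩ : (0:Int) ≤ (d:Int) ∧ ((d:Int)) < 1114112)]
  simp

theorem pvChr?_neg_none (d : Nat) (h : d ≠ 0) : pvChr? (-(d : Int)) = none := by
  rw [pvChr?, if_neg]
  rintro ⟨h1, -⟩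
  omega

set_option maxRecDepth 8192 in
theorem pvPair?_isSome (a b : Char) :
    (pvPair? [a, b]).isSome =
      (((pvIsHexDig a || a == '+') && pvIsHexDig b) || (a == '-' && b == '0')) := by
  by_cases ha : a = '+'
  · subst ha
    cases hb : pvHexDigit? b with
    | none =>
      have hbd : pvIsHexDig b = false := by rw [← pvHexDigit?_isSome, hb]; rfl
      have h1 : pvHexInt? ['+', b] = none := by simp [pvHexInt?, pvHexDigits?_single, hb]
      rw [pvPair?, h1]
      simp [hbd]
    | some d =>
      have hbd : pvIsHexDig b = true := by rw [← pvHexDigit?_isSome, hb]; rfl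
      have hlt := pvHexDigit?_lt b d hb
      have h1 : pvHexInt? ['+', b] = some (d : Int) := by simp [pvHexInt?, pvHexDigits?_single, hb]
      rw [pvPair?, h1, Option.bind_some, pvChr?_of_lt d (by omega)]
      simp [hbd]
  · by_cases hm : a = '-'
    · subst hm
      cases hb : pvHexDigit? b with
      | none =>
        have hbd : pvIsHexDig b = false := by rw [← pvHexDigit?_isSome, hb]; rfl
        have hb0 : (b == '0') = false := by
          simp only [beq_eq_false_iff_ne]
          intro h; subst h; exact absurd hb (by decide)
        have h1 : pvHexInt? ['-', b] = none := by simp [pvHexInt?, pvHexDigits?_single, hb]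
        rw [pvPair?, h1]
        simp [hbd, hb0]
      | some d =>
        have hbd : pvIsHexDig b = true := by rw [← pvHexDigit?_isSome, hb]; rfl
        have h1 : pvHexInt? ['-', b] = some (-(d : Int)) := by
          simp [pvHexInt?, pvHexDigits?_single, hb]
        by_cases hz : b = '0'
        · subst hz
          have hd : d = 0 := by
            have h0 := (pvHexDigit?_eq_zero '0').mpr rfl
            exact (Option.some.inj (h0.symm.trans hb)).symm
          subst hd
          have h1' : pvHexInt? ['-', '0'] = some ((0 : Nat) : Int) := by rw [h1]; norm_num
          rw [pvPair?, h1', Option.bind_some, pvChr?_of_lt 0 (by omega)]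
          simp
        · have hd0 : d ≠ 0 := fun hh => hz ((pvHexDigit?_eq_zero b).mp (hh ▸ hb))
          have hb0 : (b == '0') = false := by simp [hz]
          have hmd : pvIsHexDig '-' = false := by decide
          rw [pvPair?, h1, Option.bind_some, pvChr?_neg_none d hd0]
          simp [hbd, hb0, hmd]
    · have hA : (a == '+') = false := by simp [ha]
      have hM : (a == '-') = false := by simp [hm]
      cases haa : pvHexDigit? a with
      | none =>
        have had : pvIsHexDig a = false := by rw [← pvHexDigit?_isSome, haa]; rfl
        have h1 : pvHexInt? [a, b] = none := by
          simp [pvHexInt?, ha, hm, pvHexDigits?, haa]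
        rw [pvPair?, h1]
        simp [had, hA, hM]
      | some da =>
        have had : pvIsHexDig a = true := by rw [← pvHexDigit?_isSome, haa]; rfl
        have hla := pvHexDigit?_lt a da haa
        cases hb : pvHexDigit? b with
        | none =>
          have hbd : pvIsHexDig b = false := by rw [← pvHexDigit?_isSome, hb]; rfl
          have h1 : pvHexInt? [a, b] = none := by
            simp [pvHexInt?, ha, hm, pvHexDigits?, haa, hb]
          rw [pvPair?, h1]
          simp [hbd, hM]
        | some db =>
          have hlb := pvHexDigit?_lt b db hb
          have hbd : pvIsHexDig b = true := by rw [← pvHexDigit?_isSome, hb]; rfl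
          have h1 : pvHexInt? [a, b] = some ((da * 16 + db : Nat) : Int) := by
            simp [pvHexInt?, ha, hm, pvHexDigits?, haa, hb]
          rw [pvPair?, h1, Option.bind_some, pvChr?_of_lt (da * 16 + db) (by omega)]
          simp [had, hbd]

theorem pvCollect_eq_hexRun : ∀ l : List Char, pvCollect l = (pvHexRun l, decide ('>' ∈ l)) := by
  intro l
  induction l with
  | nil => rfl
  | cons c rest ih =>
    by_cases hgt : c = '>'
    · subst hgt
      simp [pvCollect, pvHexRun]
    · have hmem : ('>' ∈ c :: rest) ↔ ('>' ∈ rest) := by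
        rw [List.mem_cons]
        exact ⟨fun h => h.elim (fun h => absurd h.symm hgt) id, Or.inr⟩
      by_cases hsp : PySem.Chars.isspace c = true <;>
        simp [pvCollect, hgt, hsp, ih, pvHexRun, hmem]

theorem pvDecode_none_of_bad : ∀ l : List Char, pvGoodPairs l = false →
    ∀ ext : List Char, pvDecodePairs (l ++ ext) = none := by
  intro l
  induction l using pvGoodPairs.induct with
  | case1 =>
    intro h
    simp [pvGoodPairs] at h
  | case2 x =>
    intro h
    simp [pvGoodPairs] at h
  | case3 a b rest ih =>
    intro h ext
    rw [pvGoodPairs, Bool.and_eq_false_iff] at h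
    rcases h with h | h
    · have hp : pvPair? [a, b] = none := by
        rw [← Option.not_isSome_iff_eq_none, pvPair?_isSome, h]; simp
      simp [pvDecodePairs, hp]
    · have hrest := ih h ext
      cases hp : pvPair? [a, b] <;> simp [pvDecodePairs, hp, hrest]

theorem pvDecode_append_pad : ∀ l : List Char, l.length % 2 = 1 →
    pvDecodePairs (l ++ ['0']) =
      match pvDecodePairs l, pvPair? [l.getLast!, '0'] with
      | some out, some ch => some (out ++ [ch])
      | _, _ => none := by
  intro l
  induction l using pvGoodPairs.induct with
  | case1 =>
    intro h
    simp at h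
  | case2 x =>
    intro h
    have hx : ([x] : List Char).getLast! = x := by simp [List.getLast!]
    rw [hx]
    cases hq : pvPair? [x, '0'] <;> simp [pvDecodePairs, hq]
  | case3 a b rest ih =>
    intro h
    have hodd : rest.length % 2 = 1 := by simp only [List.length_cons] at h; omega
    have hne : rest ≠ [] := by intro h0; rw [h0] at hodd; simp at hodd
    have hsplit : (a :: b :: rest) ++ ['0'] = a :: b :: (rest ++ ['0']) := by simp
    rw [hsplit, pvGetLast_cons_cons a b rest hne]
    rw [show pvDecodePairs (a :: b :: (rest ++ ['0'])) =
          match pvPair? [a, b], pvDecodePairs (rest ++ ['0']) with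
          | some ch, some t => some (ch :: t)
          | some _, none => none
          | none, _ => none from rfl]
    rw [ih hodd]
    cases hp : pvPair? [a, b] <;> cases hd : pvDecodePairs rest <;>
      cases hq : pvPair? [rest.getLast!, '0'] <;>
        simp [pvDecodePairs, hp, hd]

-- proof-only views of the two pipelines, abstracted over the collected run and the flag
def pvA (hs : List Char) (f : Bool) : Int × String :=
  match pvDecodePairs hs with
  | none => (-1, "Error in hexadecimal conversion")
  | some out =>
    if f ∧ (hs.length / 2) % 2 = 1 then
      match pvPair? ((if hs.length % 2 = 1 then [hs.getLast!] else []) ++ ['0']) with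
      | none => (-1, "Error in hexadecimal conversion")
      | some ch => (0, String.ofList (out ++ [ch]))
    else (0, String.ofList out)

def pvB (hs : List Char) (f : Bool) : Int × String :=
  match pvDecodePairs (if f = true ∧ hs.length % 2 = 1 then hs ++ ['0'] else hs) with
  | none => (-1, "Error in hexadecimal conversion")
  | some out => (0, String.ofList out)

theorem pvRun_eq_pvA (l : List Char) :
    pvRun [] [] l = pvA (pvHexRun l) (decide ('>' ∈ l)) := by
  rw [pvRun, pvCollect_eq_hexRun l]
  cases hd : pvDecodePairs (pvHexRun l) <;> simp [pvA, hd]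

theorem pvAlt_eq_pvB (data : String) :
    asciiHexDecode_alt data = pvB (pvHexRun data.toList) (decide ('>' ∈ data.toList)) := by
  rw [asciiHexDecode_alt, pvCollect_eq_hexRun data.toList]
  rfl

theorem pvA_eq_pvB (hs : List Char) (f : Bool)
    (h : ¬(f = true ∧ (hs.length % 4 = 1 ∨ hs.length % 4 = 2) ∧ pvGoodPairs hs = true)) :
    pvA hs f = pvB hs f := by
  cases f with
  | false =>
    rw [pvA, pvB, if_neg (show ¬(false = true ∧ hs.length % 2 = 1) from fun h => by
      exact absurd h.1 (by simp))]
    cases pvDecodePairs hs <;> simp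
  | true =>
    by_cases hgood : pvGoodPairs hs = true
    · have hL4 : hs.length % 4 = 0 ∨ hs.length % 4 = 3 := by
        have h1 : ¬(hs.length % 4 = 1 ∨ hs.length % 4 = 2) := fun h2 => h ⟨rfl, h2, hgood⟩
        omega
      rcases hL4 with hL | hL
      · have hhalf : ¬((hs.length / 2) % 2 = 1) := by omega
        rw [pvA, pvB, if_neg (by omega : ¬(true = true ∧ hs.length % 2 = 1))]
        cases hd : pvDecodePairs hs <;> simp [hhalf]
      · have hhalf : (hs.length / 2) % 2 = 1 := by omega
        rw [pvA, pvB, if_pos (⟨rfl, by omega⟩ : (true = true ∧ hs.length % 2 = 1)),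
            pvDecode_append_pad hs (by omega)]
        rw [if_pos (by omega : hs.length % 2 = 1)]
        cases hd : pvDecodePairs hs <;> cases hq : pvPair? [hs.getLast!, '0'] <;>
          simp only [List.getLast!_eq_getLast?_getD, Char.reduceDefault] at hq <;> simp [hq, hhalf]
    · have hbad : pvGoodPairs hs = false := by simpa using hgood
      have h1 := pvDecode_none_of_bad hs hbad []
      rw [List.append_nil] at h1
      have h2 := pvDecode_none_of_bad hs hbad ['0']
      rw [pvA, pvB]
      split_ifs with hp <;> simp [h1, h2]

theorem asciiHexDecode_spec : Claim_unchanged_asciiHexDecode := by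
  intro data _
  unfold Spec_asciiHexDecode
  intro hD
  unfold D_asciiHexDecode at hD
  rw [asciiHexDecode, pvAGo_eq_pvRun data.toList [] [] (by simp), pvRun_eq_pvA,
      pvAlt_eq_pvB]
  apply pvA_eq_pvB
  rintro ⟨hf, h2, h3⟩
  exact hD ⟨by simpa using hf, h2, h3⟩
theorem asciiHexDecode_changed : Claim_changed_asciiHexDecode := by
  unfold Claim_changed_asciiHexDecode; decide
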